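-- pv_equiv track=rewrite | github.com/LuisCarretero/similar-expressions | src/dataset_generation/generator.py | generate_bin_dist
-- ===== SOURCE A (Python) =====
-- def generate_bin_dist(max_ops):
--     """
--     `max_ops`: maximum number of operators
--     Enumerate the number of possible binary trees that can be generated from empty nodes.
--     D[e][n] represents the number of different binary trees with n nodes that
--     can be generated from e empty nodes, using the following recursion:
--         D(0, n) = 0
--         D(1, n) = C_n (n-th Catalan number)
--         D(e, n) = D(e - 1, n + 1) - D(e - 2, n + 1)
--     """
--     # initialize Catalan numbers
--     catalans = [1]
--     for i in range(1, 2 * max_ops + 1):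
--         catalans.append((4 * i - 2) * catalans[i - 1] // (i + 1))
--
--     # enumerate possible trees
--     D = []
--     for e in range(max_ops + 1):  # number of empty nodes
--         s = []
--         for n in range(2 * max_ops - e + 1):  # number of operators
--             if e == 0:
--                 s.append(0)
--             elif e == 1:
--                 s.append(catalans[n])
--             else:
--                 s.append(D[e - 1][n + 1] - D[e - 2][n + 1])
--         D.append(s)
--     return D
-- ===== SOURCE B (Python) =====
-- def generate_bin_dist(max_ops):
--     D = []
--     for e in range(max_ops + 1):
--         row = []
--         c = 1  # invariant: c == C(2*n + e, n)
--         for n in range(2 * max_ops - e + 1):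
--             row.append(0 if e == 0 else e * c // (2 * n + e))
--             c = c * (2 * n + e + 1) // (n + e + 1) * (2 * n + e + 2) // (n + 1)
--         D.append(row)
--     return D
-- ===== Notes on version B (the rewrite author's own statement) =====
-- stated objective: alternative
-- what changed: A precomputes a Catalan array and fills each table row from the two previous rows via D[e][n] = D[e-1][n+1] - D[e-2][n+1]; B computes each row independently from the ballot-number closed form e*C(2n+e,n)//(2n+e), maintaining the single binomial coefficient C(2n+e,n) incrementally along the row, with no Catalan array and no dependence between rows.
import Mathlib
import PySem

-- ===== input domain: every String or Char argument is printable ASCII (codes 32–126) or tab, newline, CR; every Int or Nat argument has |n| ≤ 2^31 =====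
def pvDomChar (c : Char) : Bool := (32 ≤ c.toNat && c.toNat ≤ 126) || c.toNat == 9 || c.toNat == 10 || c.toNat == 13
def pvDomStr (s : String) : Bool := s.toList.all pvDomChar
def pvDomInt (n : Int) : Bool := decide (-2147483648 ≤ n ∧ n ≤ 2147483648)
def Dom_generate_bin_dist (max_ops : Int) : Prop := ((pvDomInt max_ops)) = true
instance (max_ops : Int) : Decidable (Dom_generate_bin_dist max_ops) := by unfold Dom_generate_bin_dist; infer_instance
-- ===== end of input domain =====

-- B replaces A's two-stage DP (Catalan precompute + table recurrence) by computing every cell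
-- independently from the ballot-number closed form e*C(2n+e,n)//(2n+e) (objective: alternative).

-- ===== PORT A =====
-- Python list indexing (catalans[i-1], D[e-1][n+1], D[e-2][n+1]) is always in range when
-- reached, so pyGetD's default is never used and the port is exact.
def generate_bin_dist (max_ops : Int) : List (List Int) :=
  let catalans : List Int :=
    (PySem.List.pyRange 1 (2 * max_ops + 1)).foldl
      (fun cat i =>
        cat ++ [PySem.Int.floordiv ((4 * i - 2) * PySem.List.pyGetD cat (i - 1) 0) (i + 1)])
      [1]
  (PySem.List.pyRange 0 (max_ops + 1)).foldl
    (fun D e =>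
      D ++ [(PySem.List.pyRange 0 (2 * max_ops - e + 1)).foldl
        (fun s n =>
          if e = 0 then s ++ [0]
          else if e = 1 then s ++ [PySem.List.pyGetD catalans n 0]
          else s ++ [PySem.List.pyGetD (PySem.List.pyGetD D (e - 1) []) (n + 1) 0 -
                     PySem.List.pyGetD (PySem.List.pyGetD D (e - 2) []) (n + 1) 0])
        []])
    []

-- ===== PORT B =====
-- Source B keeps a running binomial c = C(2n+e, n) along each row and computes each cell
-- from the closed form e*c//(2n+e); rows are independent of one another.
def generate_bin_dist_alt (max_ops : Int) : List (List Int) :=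
  (PySem.List.pyRange 0 (max_ops + 1)).foldl
    (fun D e =>
      D ++ [((PySem.List.pyRange 0 (2 * max_ops - e + 1)).foldl
        (fun (p : List Int × Int) n =>
          (p.1 ++ [if e = 0 then 0 else PySem.Int.floordiv (e * p.2) (2 * n + e)],
           PySem.Int.floordiv
             (PySem.Int.floordiv (p.2 * (2 * n + e + 1)) (n + e + 1) * (2 * n + e + 2))
             (n + 1)))
        ([], 1)).1])
    []

-- ===== PRECONDITION & SPEC =====
def Spec_generate_bin_dist (max_ops : Int) (out : List (List Int)) : Prop := out = generate_bin_dist_alt max_ops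
instance (max_ops : Int) (out : List (List Int)) : Decidable (Spec_generate_bin_dist max_ops out) := by unfold Spec_generate_bin_dist; infer_instance

-- ===== CLAIM (what is proved, stated in full; the proofs are below) =====
def Claim_equal_generate_bin_dist : Prop := ∀ (max_ops : Int), Dom_generate_bin_dist max_ops → Spec_generate_bin_dist max_ops (generate_bin_dist max_ops)

-- ===== LEMMAS AND PROOFS =====

-- gTab e n: the common value of cell D[e][n] of both programs (ballot numbers)
def gTab : ℕ → ℕ → ℤ
  | 0, _ => 0
  | e + 1, n => ((2 * n + e).choose n : ℤ) - ((2 * n + e).choose (n + e + 1) : ℤ)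

-- the common value of both programs for max_ops = K ≥ 0
def tab (K : ℕ) : List (List Int) :=
  (List.range (K + 1)).map (fun e => (List.range (2 * K - e + 1)).map (fun n => gTab e n))

-- row e of the common table
def rowT (K e : ℕ) : List Int := (List.range (2 * K - e + 1)).map (fun n => gTab e n)

-- A's Catalan recurrence step is exact: (4t+2)·C_t = (t+2)·C_{t+1}
lemma cat_step (t : ℕ) : (4 * t + 2) * catalan t = (t + 2) * catalan (t + 1) := by
  have h1 := succ_mul_catalan_eq_centralBinom t
  have h2 := succ_mul_catalan_eq_centralBinom (t + 1)
  have h3 := Nat.succ_mul_centralBinom_succ t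
  have key : (t + 1) * ((4 * t + 2) * catalan t) = (t + 1) * ((t + 2) * catalan (t + 1)) := by
    nlinarith [h1, h2, h3]
  exact Nat.eq_of_mul_eq_mul_left (by omega) key

-- binomial ratio: n·C(2n+f, n) = (n+f+1)·C(2n+f, n+f+1)
lemma ratio_lemma (f n : ℕ) :
    n * (2 * n + f).choose n = (n + f + 1) * (2 * n + f).choose (n + f + 1) := by
  cases n with
  | zero =>
    rw [Nat.choose_eq_zero_of_lt (show 2 * 0 + f < 0 + f + 1 by omega)]
    simp
  | succ q =>
    have h := Nat.choose_succ_right_eq (2 * (q + 1) + f) q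
    have he : 2 * (q + 1) + f - q = q + f + 2 := by omega
    rw [he] at h
    have hsym : (2 * (q + 1) + f).choose (q + 1 + f + 1) = (2 * (q + 1) + f).choose q := by
      have hs := Nat.choose_symm (n := 2 * (q + 1) + f) (k := q + 1 + f + 1) (by omega)
      have he2 : 2 * (q + 1) + f - (q + 1 + f + 1) = q := by omega
      rw [he2] at hs
      omega
    rw [hsym, Nat.mul_comm (q + 1), h]
    ring

-- Pascal in symmetric form: C(2n+f+1, n) = C(2n+f, n) + C(2n+f, n+f+1)
lemma pascal_sym (f n : ℕ) :
    (2 * n + f + 1).choose n = (2 * n + f).choose n + (2 * n + f).choose (n + f + 1) := by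
  cases n with
  | zero =>
    rw [Nat.choose_eq_zero_of_lt (show 2 * 0 + f < 0 + f + 1 by omega)]
    simp
  | succ q =>
    have hp := Nat.choose_succ_succ (2 * (q + 1) + f) q
    simp only [Nat.succ_eq_add_one] at hp
    have hsym : (2 * (q + 1) + f).choose (q + 1 + f + 1) = (2 * (q + 1) + f).choose q := by
      have hs := Nat.choose_symm (n := 2 * (q + 1) + f) (k := q + 1 + f + 1) (by omega)
      have he2 : 2 * (q + 1) + f - (q + 1 + f + 1) = q := by omega
      rw [he2] at hs
      omega
    omega

-- (2n+e)·gTab e n = e·C(2n+e, n) for e = f+1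
lemma key_identity (f n : ℕ) :
    ((2 * n + f + 1 : ℕ) : ℤ) * gTab (f + 1) n = ((f : ℤ) + 1) * ((2 * n + f + 1).choose n : ℤ) := by
  have hr : ((n : ℤ)) * ((2 * n + f).choose n : ℤ)
      = ((n : ℤ) + f + 1) * ((2 * n + f).choose (n + f + 1) : ℤ) := by
    exact_mod_cast congrArg (Nat.cast : ℕ → ℤ) (ratio_lemma f n)
  have hp : (((2 * n + f + 1).choose n : ℕ) : ℤ)
      = ((2 * n + f).choose n : ℤ) + ((2 * n + f).choose (n + f + 1) : ℤ) := by
    exact_mod_cast congrArg (Nat.cast : ℕ → ℤ) (pascal_sym f n)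
  show ((2 * n + f + 1 : ℕ) : ℤ) * (((2 * n + f).choose n : ℤ) - ((2 * n + f).choose (n + f + 1) : ℤ)) = _
  push_cast
  push_cast at hr hp
  linear_combination (-(f : ℤ) - 1) * hp + 2 * hr

-- B's cell formula computes gTab
lemma closed_eq_g (f n : ℕ) :
    PySem.Int.floordiv (((f : ℤ) + 1) * ((2 * n + f + 1).choose n : ℕ)) ((2 * n + f + 1 : ℕ) : ℤ)
      = gTab (f + 1) n := by
  have hd : (0 : ℤ) < ((2 * n + f + 1 : ℕ) : ℤ) := by exact_mod_cast Nat.succ_pos _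
  rw [PySem.Int.floordiv_eq_ediv_of_pos hd, ← key_identity f n,
    Int.mul_ediv_cancel_left _ (ne_of_gt hd)]

-- row e = 1 of the table is the Catalan sequence
lemma g1_eq_catalan (n : ℕ) : gTab 1 n = (catalan n : ℤ) := by
  have h := Nat.choose_succ_right_eq (2 * n) n
  have he : 2 * n - n = n := by omega
  rw [he] at h
  have hc := succ_mul_catalan_eq_centralBinom n
  have hcb : Nat.centralBinom n = (2 * n).choose n := rfl
  rw [hcb] at hc
  have key : ((n : ℤ) + 1) * gTab 1 n = ((n : ℤ) + 1) * (catalan n : ℤ) := by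
    show ((n : ℤ) + 1) * (((2 * n + 0).choose n : ℤ) - ((2 * n + 0).choose (n + 0 + 1) : ℤ)) = _
    simp only [Nat.add_zero]
    have h' : ((2 * n).choose (n + 1) : ℤ) * ((n : ℤ) + 1) = ((2 * n).choose n : ℤ) * n := by
      exact_mod_cast congrArg (Nat.cast : ℕ → ℤ) h
    have hc' : ((n : ℤ) + 1) * (catalan n : ℤ) = ((2 * n).choose n : ℤ) := by
      exact_mod_cast congrArg (Nat.cast : ℕ → ℤ) hc
    linear_combination -hc' - h'
  exact mul_left_cancel₀ (by positivity) key

-- A's table recurrence holds for gTab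
lemma grec (f n : ℕ) : gTab (f + 2) n = gTab (f + 1) (n + 1) - gTab f (n + 1) := by
  cases f with
  | zero =>
    show ((2 * n + 1).choose n : ℤ) - ((2 * n + 1).choose (n + 2) : ℤ)
      = (((2 * (n + 1)).choose (n + 1) : ℤ) - ((2 * (n + 1)).choose (n + 2) : ℤ)) - 0
    have p1 := Nat.choose_succ_succ (2 * n + 1) n
    have p2 := Nat.choose_succ_succ (2 * n + 1) (n + 1)
    have e1 : 2 * (n + 1) = 2 * n + 1 + 1 := by omega
    rw [e1]
    push_cast [p1, p2]
    ring
  | succ s =>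
    show ((2 * n + (s + 2)).choose n : ℤ) - ((2 * n + (s + 2)).choose (n + (s + 2) + 1) : ℤ)
      = (((2 * (n + 1) + (s + 1)).choose (n + 1) : ℤ) - ((2 * (n + 1) + (s + 1)).choose (n + 1 + (s + 1) + 1) : ℤ))
        - (((2 * (n + 1) + s).choose (n + 1) : ℤ) - ((2 * (n + 1) + s).choose (n + 1 + s + 1) : ℤ))
    have p1 := Nat.choose_succ_succ (2 * n + s + 2) n
    have p2 := Nat.choose_succ_succ (2 * n + s + 2) (n + s + 2)
    have e1 : 2 * (n + 1) + (s + 1) = 2 * n + s + 2 + 1 := by omega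
    have e2 : 2 * (n + 1) + s = 2 * n + s + 2 := by omega
    have e3 : 2 * n + (s + 2) = 2 * n + s + 2 := by omega
    have e4 : n + (s + 2) + 1 = n + s + 2 + 1 := by omega
    have e5 : n + 1 + (s + 1) + 1 = n + s + 2 + 1 := by omega
    have e6 : n + 1 + s + 1 = n + s + 2 := by omega
    rw [e1, e2, e3, e4, e5, e6]
    push_cast [p1, p2]
    ring

-- A's catalans list is the Catalan sequence
lemma catListA (t : ℕ) :
    (PySem.List.pyRange 1 ((t : ℤ) + 1)).foldl
      (fun cat i =>
        cat ++ [PySem.Int.floordiv ((4 * i - 2) * PySem.List.pyGetD cat (i - 1) 0) (i + 1)])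
      [1]
    = (List.range (t + 1)).map (fun i => (catalan i : ℤ)) := by
  induction t with
  | zero => simp [PySem.List.pyRange_one_eq_nil]
  | succ t ih =>
    have hrange : PySem.List.pyRange 1 ((t : ℤ) + 1 + 1)
        = PySem.List.pyRange 1 ((t : ℤ) + 1) ++ [(t : ℤ) + 1] :=
      PySem.List.pyRange_one_succ_right (by omega)
    push_cast
    rw [hrange, List.foldl_append, ih]
    simp only [List.foldl]
    have hidx : (t : ℤ) + 1 - 1 = (t : ℤ) := by ring
    rw [hidx, PySem.List.pyGetD_natCast]
    have hget : (List.map (fun i => (catalan i : ℤ)) (List.range (t + 1))).getD t 0 = (catalan t : ℤ) := by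
      rw [List.getD_eq_getElem _ _ (by simp)]
      simp
    rw [hget]
    have hmul : (4 * ((t : ℤ) + 1) - 2) * (catalan t : ℤ) = (((4 * t + 2) * catalan t : ℕ) : ℤ) := by
      push_cast; ring
    have hden : (t : ℤ) + 1 + 1 = ((t + 2 : ℕ) : ℤ) := by push_cast; ring
    rw [hmul, hden, PySem.Int.floordiv_natCast, cat_step, Nat.mul_div_cancel_left _ (by omega)]
    simp [List.range_succ]

-- A's inner loop builds row e of the table, given the previous rows
lemma innerA (K e : ℕ) (he : e ≤ K) :
    ∀ j : ℕ, j ≤ 2 * K - e + 1 →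
    (PySem.List.pyRange 0 (j : ℤ)).foldl
      (fun s n =>
        if (e : ℤ) = 0 then s ++ [0]
        else if (e : ℤ) = 1 then
          s ++ [PySem.List.pyGetD ((List.range (2 * K + 1)).map (fun i => (catalan i : ℤ))) n 0]
        else s ++ [PySem.List.pyGetD (PySem.List.pyGetD ((List.range e).map (rowT K)) ((e : ℤ) - 1) []) (n + 1) 0 -
                   PySem.List.pyGetD (PySem.List.pyGetD ((List.range e).map (rowT K)) ((e : ℤ) - 2) []) (n + 1) 0])
      []
    = (List.range j).map (fun n => gTab e n) := by
  intro j
  induction j with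
  | zero => intro _; simp [PySem.List.pyRange_one_eq_nil]
  | succ j ih =>
    intro hj
    have hrange : PySem.List.pyRange 0 ((j : ℤ) + 1) = PySem.List.pyRange 0 (j : ℤ) ++ [(j : ℤ)] :=
      PySem.List.pyRange_one_succ_right (by omega)
    push_cast
    rw [hrange, List.foldl_append, ih (by omega)]
    simp only [List.foldl]
    match e, he, hj with
    | 0, _, _ =>
      rw [if_pos (by norm_num)]
      rw [List.range_succ, List.map_append]
      simp [gTab]
    | 1, h1, hj =>
      rw [if_neg (by norm_num), if_pos (by norm_num)]
      have hjlt : j < 2 * K + 1 := by omega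
      rw [PySem.List.pyGetD_natCast, List.getD_eq_getElem _ _ (by simpa using hjlt)]
      simp only [List.getElem_map, List.getElem_range]
      rw [List.range_succ, List.map_append]
      simp [g1_eq_catalan]
    | (f + 2), hf, hj =>
      rw [if_neg (by exact_mod_cast Nat.succ_ne_zero (f + 1)), if_neg (by
        intro hcon
        have h12 : (f : ℤ) + 2 = 1 := by push_cast at hcon; linarith
        have h13 : f + 2 = 1 := by exact_mod_cast h12
        omega)]
      have hi1 : ((f + 2 : ℕ) : ℤ) - 1 = ((f + 1 : ℕ) : ℤ) := by push_cast; ring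
      have hi2 : ((f + 2 : ℕ) : ℤ) - 2 = ((f : ℕ) : ℤ) := by push_cast; ring
      push_cast at hi1 hi2 ⊢
      rw [hi1, hi2]
      have hD1 : PySem.List.pyGetD ((List.range (f + 2)).map (rowT K)) ((f : ℤ) + 1) [] = rowT K (f + 1) := by
        have hcast : (f : ℤ) + 1 = ((f + 1 : ℕ) : ℤ) := by push_cast; ring
        rw [hcast, PySem.List.pyGetD_natCast, List.getD_eq_getElem _ _ (by simp)]
        simp
      have hD2 : PySem.List.pyGetD ((List.range (f + 2)).map (rowT K)) ((f : ℕ) : ℤ) [] = rowT K f := by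
        rw [PySem.List.pyGetD_natCast, List.getD_eq_getElem _ _ (by simp)]
        simp
      rw [hD1, hD2]
      have hj1 : (j : ℤ) + 1 = ((j + 1 : ℕ) : ℤ) := by push_cast; ring
      have hr1 : PySem.List.pyGetD (rowT K (f + 1)) ((j : ℤ) + 1) 0 = gTab (f + 1) (j + 1) := by
        rw [hj1, PySem.List.pyGetD_natCast, rowT,
          List.getD_eq_getElem _ _ (by simp; omega)]
        simp
      have hr2 : PySem.List.pyGetD (rowT K f) ((j : ℤ) + 1) 0 = gTab f (j + 1) := by
        rw [hj1, PySem.List.pyGetD_natCast, rowT,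
          List.getD_eq_getElem _ _ (by simp; omega)]
        simp
      rw [hr1, hr2]
      rw [List.range_succ, List.map_append]
      simp [grec]

-- A's outer loop builds the table row by row
lemma outerA (K : ℕ) : ∀ t : ℕ, t ≤ K + 1 →
    (PySem.List.pyRange 0 (t : ℤ)).foldl
      (fun D e =>
        D ++ [(PySem.List.pyRange 0 (2 * (K : ℤ) - e + 1)).foldl
          (fun s n =>
            if e = 0 then s ++ [0]
            else if e = 1 then
              s ++ [PySem.List.pyGetD ((List.range (2 * K + 1)).map (fun i => (catalan i : ℤ))) n 0]
            else s ++ [PySem.List.pyGetD (PySem.List.pyGetD D (e - 1) []) (n + 1) 0 -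
                       PySem.List.pyGetD (PySem.List.pyGetD D (e - 2) []) (n + 1) 0])
          []])
      []
    = (List.range t).map (rowT K) := by
  intro t
  induction t with
  | zero => intro _; simp [PySem.List.pyRange_one_eq_nil]
  | succ t ih =>
    intro ht
    have hrange : PySem.List.pyRange 0 ((t : ℤ) + 1) = PySem.List.pyRange 0 (t : ℤ) ++ [(t : ℤ)] :=
      PySem.List.pyRange_one_succ_right (by omega)
    push_cast
    rw [hrange, List.foldl_append, ih (by omega)]
    simp only [List.foldl]
    have htK : t ≤ K := by omega
    have hb : 2 * (K : ℤ) - (t : ℤ) + 1 = ((2 * K - t + 1 : ℕ) : ℤ) := by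
      have : t ≤ 2 * K := by omega
      push_cast [Nat.cast_sub this]; ring
    rw [hb]
    rw [innerA K t htK (2 * K - t + 1) (le_refl _)]
    simp [rowT, List.range_succ]

-- A's port computes the table (for nonnegative max_ops = K)
lemma A_eq (K : ℕ) : generate_bin_dist (K : ℤ) = tab K := by
  have hc : 2 * (K : ℤ) + 1 = ((2 * K : ℕ) : ℤ) + 1 := by push_cast; ring
  have h1 : (K : ℤ) + 1 = ((K + 1 : ℕ) : ℤ) := by push_cast; ring
  simp only [generate_bin_dist, hc, catListA (2 * K), h1]
  rw [outerA K (K + 1) (le_refl _)]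
  unfold tab rowT
  rfl

-- the two exact-division steps of B's running binomial update
lemma cstep (e n : ℕ) :
    PySem.Int.floordiv
      (PySem.Int.floordiv (((2 * n + e).choose n : ℤ) * (2 * (n : ℤ) + e + 1)) ((n : ℤ) + e + 1)
        * (2 * (n : ℤ) + e + 2))
      ((n : ℤ) + 1)
    = ((2 * (n + 1) + e).choose (n + 1) : ℤ) := by
  have s1 : ((2 * n + e).choose n : ℤ) * (2 * (n : ℤ) + e + 1)
      = (((2 * n + e).choose n * (2 * n + e + 1) : ℕ) : ℤ) := by push_cast; ring
  have h1 : (2 * n + e).choose n * (2 * n + e + 1) = (2 * n + e + 1).choose n * (n + e + 1) := by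
    have := Nat.choose_mul_succ_eq (2 * n + e) n
    have he : 2 * n + e + 1 - n = n + e + 1 := by omega
    rw [he] at this
    omega
  have hden1 : (n : ℤ) + e + 1 = ((n + e + 1 : ℕ) : ℤ) := by push_cast; ring
  rw [s1, h1, hden1, PySem.Int.floordiv_natCast, Nat.mul_div_cancel _ (by omega)]
  have s2 : ((2 * n + e + 1).choose n : ℤ) * (2 * (n : ℤ) + e + 2)
      = (((2 * n + e + 2) * (2 * n + e + 1).choose n : ℕ) : ℤ) := by push_cast; ring
  have h2 : (2 * n + e + 2) * (2 * n + e + 1).choose n = (2 * n + e + 2).choose (n + 1) * (n + 1) := by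
    exact Nat.add_one_mul_choose_eq (2 * n + e + 1) n
  have hden2 : (n : ℤ) + 1 = ((n + 1 : ℕ) : ℤ) := by push_cast; ring
  rw [s2, h2, hden2, PySem.Int.floordiv_natCast, Nat.mul_div_cancel _ (by omega)]
  norm_cast
  congr 1
  omega

-- B's inner loop: s collects the row cells, c carries C(2n+e, n)
lemma innerB (e : ℕ) : ∀ j : ℕ,
    (PySem.List.pyRange 0 (j : ℤ)).foldl
      (fun (p : List Int × Int) n =>
        (p.1 ++ [if (e : ℤ) = 0 then 0 else PySem.Int.floordiv ((e : ℤ) * p.2) (2 * n + e)],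
         PySem.Int.floordiv
           (PySem.Int.floordiv (p.2 * (2 * n + e + 1)) (n + e + 1) * (2 * n + e + 2))
           (n + 1)))
      ([], 1)
    = ((List.range j).map (fun n => gTab e n), ((2 * j + e).choose j : ℤ)) := by
  intro j
  induction j with
  | zero => simp [PySem.List.pyRange_one_eq_nil]
  | succ j ih =>
    have hcast : ((j : ℤ) + 1) = (((j+1 : ℕ) : ℤ)) := by push_cast; ring
    have hrange : PySem.List.pyRange 0 (((j+1 : ℕ)) : ℤ) = PySem.List.pyRange 0 (j : ℤ) ++ [(j : ℤ)] := by
      rw [← hcast]; exact PySem.List.pyRange_one_succ_right (by omega)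
    rw [hrange, List.foldl_append, ih]
    simp only [List.foldl]
    rw [Prod.mk.injEq]
    refine ⟨?_, ?_⟩
    · rw [List.range_succ, List.map_append]
      cases e with
      | zero => simp [gTab]
      | succ f =>
        simp only [List.map_cons, List.map_nil]
        rw [if_neg (by exact_mod_cast Nat.succ_ne_zero f)]
        have hg := closed_eq_g f j
        have hc : 2 * j + (f + 1) = 2 * j + f + 1 := by omega
        rw [hc]
        have hel : PySem.Int.floordiv (((f + 1 : ℕ) : ℤ) * (((2 * j + f + 1).choose j : ℕ) : ℤ))
            (2 * (j : ℤ) + ((f + 1 : ℕ) : ℤ)) = gTab (f + 1) j := by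
          have h2 : ((f + 1 : ℕ) : ℤ) = (f : ℤ) + 1 := by push_cast; ring
          rw [h2]
          have h4 : 2 * (j : ℤ) + ((f : ℤ) + 1) = ((2 * j + f + 1 : ℕ) : ℤ) := by push_cast; ring
          rw [h4]
          exact hg
        rw [hel]
    · exact cstep e j

-- B's port computes the table (for nonnegative max_ops = K)
lemma alt_eq (K : ℕ) : generate_bin_dist_alt (K : ℤ) = tab K := by
  unfold generate_bin_dist_alt tab
  rw [PySem.List.foldl_append_singleton_eq_map]
  have h1 : (K : ℤ) + 1 = ((K + 1 : ℕ) : ℤ) := by push_cast; ring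
  rw [h1, PySem.List.pyRange_zero_nat, List.map_map]
  simp only [List.nil_append]
  apply List.map_congr_left
  intro e he
  have heK : e ≤ K := Nat.lt_succ_iff.mp (List.mem_range.mp he)
  simp only [Function.comp]
  have h2 : 2 * (K : ℤ) - (e : ℤ) + 1 = ((2 * K - e + 1 : ℕ) : ℤ) := by
    have : e ≤ 2 * K := by omega
    push_cast [Nat.cast_sub this]
    ring
  rw [h2, innerB e (2 * K - e + 1)]

-- ===== VERDICT (by name: the statement is the Claim_ definition above) =====
theorem generate_bin_dist_spec : Claim_equal_generate_bin_dist := by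
  intro max_ops _
  unfold Spec_generate_bin_dist
  by_cases h : 0 ≤ max_ops
  · obtain ⟨K, rfl⟩ := Int.eq_ofNat_of_zero_le h
    rw [A_eq, alt_eq]
  · rw [not_le] at h
    have hnil : PySem.List.pyRange 0 (max_ops + 1) = [] :=
      PySem.List.pyRange_one_eq_nil (by omega)
    simp [generate_bin_dist, generate_bin_dist_alt, hnil]
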